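-- pv_equiv track=rewrite | github.com/EJahren/my_aoc_solutions | 2015/day19.py | count_molecules
-- ===== SOURCE A (Python) =====
-- def count_molecules(replacements, molecule):
--     distinct = set()
--
--     for k, v in replacements:
--         i = 0
--         start = 0
--         i = molecule.find(k, start)
--         while i >= 0:
--             distinct.add(molecule[:i] + v + molecule[i + len(k) :])
--             start = i + 1
--             i = molecule.find(k, start)
--     return len(distinct)
-- ===== SOURCE B (Python) =====
-- def count_molecules(replacements, molecule):
--     candidates = []
--     for i in range(len(molecule) + 1):
--         for k, v in replacements:
--             if molecule[i:i + len(k)] == k: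
--                 candidates.append(molecule[:i] + v + molecule[i + len(k):])
--     candidates.sort()
--     count = 0
--     prev = None
--     for c in candidates:
--         if c != prev:
--             count += 1
--         prev = c
--     return count
-- ===== Notes on version B (the rewrite author's own statement) =====
-- stated objective: alternative
-- what changed: A loops per replacement pair with repeated str.find and deduplicates in a hash set; B generates candidates position-major (one pass over cut positions, testing each key by slice comparison) and counts distinct without any set, by sorting the candidate list once and counting boundaries in a single linear scan with a prev accumulator.
import Mathlib
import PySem

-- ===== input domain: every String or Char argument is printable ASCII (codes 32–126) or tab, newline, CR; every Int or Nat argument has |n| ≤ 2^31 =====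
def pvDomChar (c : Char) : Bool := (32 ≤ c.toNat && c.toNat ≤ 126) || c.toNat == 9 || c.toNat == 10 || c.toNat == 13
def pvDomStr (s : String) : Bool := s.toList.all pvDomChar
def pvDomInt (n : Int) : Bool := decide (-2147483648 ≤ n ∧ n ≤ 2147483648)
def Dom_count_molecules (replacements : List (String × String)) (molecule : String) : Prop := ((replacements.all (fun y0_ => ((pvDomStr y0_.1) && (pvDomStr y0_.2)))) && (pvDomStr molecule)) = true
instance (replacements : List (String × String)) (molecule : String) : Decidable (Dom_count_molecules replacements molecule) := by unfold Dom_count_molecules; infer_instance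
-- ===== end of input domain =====

-- B replaces A's per-pair str.find re-scanning loops and hash-set deduplication by a position-major
-- generation pass followed by sort-then-scan distinct counting (no set); objective: alternative.

-- ===== PORT A =====
-- while i >= 0: distinct.add(molecule[:i] + v + molecule[i+len(k):]); start = i+1; i = molecule.find(k, start)
def pvFindLoop (mol k v : List Char) (fuel start : Nat) (dist : PySem.Set (List Char)) : PySem.Set (List Char) :=
  match fuel with
  | 0 => dist
  | fuel + 1 =>
    if 0 ≤ PySem.Chars.findFrom mol k (start : Int) none then
      pvFindLoop mol k v fuel ((PySem.Chars.findFrom mol k (start : Int) none).toNat + 1)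
        (PySem.Set.add dist
          (PySem.List.slice mol none (some (PySem.Chars.findFrom mol k (start : Int) none)) ++ v ++
           PySem.List.slice mol (some (PySem.Chars.findFrom mol k (start : Int) none + (k.length : Int))) none))
    else dist

def count_molecules (replacements : List (String × String)) (molecule : String) : Int :=
  ((replacements.foldl
      (fun dist kv => pvFindLoop molecule.toList kv.1.toList kv.2.toList (molecule.toList.length + 2) 0 dist)
      PySem.Set.empty).length : Int)

-- ===== PORT B =====
-- inner loop over the pairs at one cut position i: for k, v: if molecule[i:i+len(k)] == k: candidates.append(...)
def pvCandsAt (replacements : List (String × String)) (m : List Char) (i : Int) : List (List Char) :=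
  (replacements.filter
      (fun kv => PySem.List.slice m (some i) (some (i + (kv.1.toList.length : Int))) == kv.1.toList)).map
    (fun kv => PySem.List.slice m none (some i) ++ kv.2.toList ++
               PySem.List.slice m (some (i + (kv.1.toList.length : Int))) none)

def count_molecules_alt (replacements : List (String × String)) (molecule : String) : Int :=
  let m := molecule.toList
  let candidates := (PySem.List.pyRange 0 ((m.length : Int) + 1) 1).flatMap (pvCandsAt replacements m)
  -- list.sort() on strings: lexicographic by code point = the linear order on List Char
  let sortedC := @PySem.List.sorted (List Char) (List Char) List.instLinearOrder.toLT
      LinearOrder.toDecidableLT candidates (fun x => x) false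
  (sortedC.foldl (fun s c => (if some c == s.2 then s.1 else s.1 + 1, some c))
      ((0 : Int), (none : Option (List Char)))).1

-- ===== PRECONDITION & SPEC =====
def Spec_count_molecules (replacements : List (String × String)) (molecule : String) (out : Int) : Prop := out = count_molecules_alt replacements molecule
instance (replacements : List (String × String)) (molecule : String) (out : Int) : Decidable (Spec_count_molecules replacements molecule out) := by unfold Spec_count_molecules; infer_instance

-- ===== CLAIM (what is proved, stated in full; the proofs are below) =====
def Claim_equal_count_molecules : Prop := ∀ (replacements : List (String × String)) (molecule : String), Dom_count_molecules replacements molecule → Spec_count_molecules replacements molecule (count_molecules replacements molecule)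

-- ===== LEMMAS AND PROOFS =====

-- the candidate obtained by replacing the length-lk key at cut position i by v
def pvCand (m v : List Char) (i lk : Nat) : List Char := m.take i ++ v ++ m.drop (i + lk)

-- bounds of str.find(k, start) needed for the termination of the while-loop port below
lemma pvFindFrom_neg_of_gt (m k : List Char) (start : Nat) (h : m.length < start) :
    PySem.Chars.findFrom m k (start : Int) none = -1 := by
  simp only [PySem.Chars.findFrom]
  split_ifs with h1 h2 h3 <;> omega

lemma pvFindFrom_bounds (m k : List Char) (start : Nat)
    (h : 0 ≤ PySem.Chars.findFrom m k (start : Int) none) :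
    start ≤ (PySem.Chars.findFrom m k (start : Int) none).toNat ∧
      (PySem.Chars.findFrom m k (start : Int) none).toNat ≤ m.length := by
  by_cases hk : start ≤ m.length
  · rw [PySem.Chars.findFrom_natCast m k start hk] at h ⊢
    have hle := PySem.Chars.find_le_length (m.drop start) k
    have hge := PySem.Chars.neg_one_le_find (m.drop start) k
    simp only [List.length_drop] at hle
    split_ifs at h ⊢ with hfi
    · omega
    · omega
  · rw [pvFindFrom_neg_of_gt m k start (by omega)] at h; omega

lemma pvFindFrom_cases (m k : List Char) (start : Nat) :
    PySem.Chars.findFrom m k (start : Int) none = -1 ∨ 0 ≤ PySem.Chars.findFrom m k (start : Int) none := by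
  simp only [PySem.Chars.findFrom]
  have := PySem.Chars.neg_one_le_find (List.drop (Int.toNat (start : Int)) (List.take (Int.toNat (m.length : Int)) m)) k
  split_ifs <;> omega

lemma pvOutBridge (m v k : List Char) (i : Int) (h0 : 0 ≤ i) :
    PySem.List.slice m none (some i) ++ v ++ PySem.List.slice m (some (i + (k.length : Int))) none =
      pvCand m v i.toNat k.length := by
  rw [PySem.List.slice_to m h0, PySem.List.slice_from m (by omega)]
  have h1 : (i + (k.length : Int)).toNat = i.toNat + k.length := by omega
  rw [h1]; rfl

lemma mem_pvFindLoop (m k v : List Char) (fuel : Nat) (start : Nat) (dist : PySem.Set (List Char))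
    (s : List Char) (hf : m.length + 1 ≤ fuel + start) :
    s ∈ pvFindLoop m k v fuel start dist ↔
      s ∈ dist ∨ ∃ i : Nat, start ≤ i ∧ i ≤ m.length ∧ k <+: m.drop i ∧ s = pvCand m v i k.length := by
  induction fuel generalizing start dist with
  | zero =>
    rw [pvFindLoop]
    constructor
    · exact Or.inl
    · rintro (hs | ⟨i, hi1, hi2, _, _⟩)
      · exact hs
      · omega
  | succ fuel ih =>
    rw [pvFindLoop]
    by_cases h : 0 ≤ PySem.Chars.findFrom m k (start : Int) none
    · rw [if_pos h]
      have hb := pvFindFrom_bounds m k start h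
      have hk : start ≤ m.length := by omega
      obtain ⟨hsle, hpre, hmin⟩ := PySem.Chars.findFrom_natCast_spec m k start hk (by omega)
      rw [ih _ _ (by omega), pvOutBridge m v k _ h, PySem.Set.mem_add]
      constructor
      · rintro (⟨hs | hs⟩ | ⟨i, hi1, hi2, hi3, hi4⟩)
        · exact Or.inl hs
        · exact Or.inr ⟨(PySem.Chars.findFrom m k (start : Int) none).toNat, by omega, by omega, hpre, hs⟩
        · exact Or.inr ⟨i, by omega, hi2, hi3, hi4⟩
      · rintro (hs | ⟨i, hi1, hi2, hi3, hi4⟩)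
        · exact Or.inl (Or.inl hs)
        · by_cases hlt : i < (PySem.Chars.findFrom m k (start : Int) none).toNat
          · exact absurd hi3 (hmin i hi1 hlt)
          · by_cases heq : i = (PySem.Chars.findFrom m k (start : Int) none).toNat
            · subst heq; exact Or.inl (Or.inr hi4)
            · exact Or.inr ⟨i, by omega, hi2, hi3, hi4⟩
    · rw [if_neg h]
      constructor
      · exact Or.inl
      · rintro (hs | ⟨i, hi1, hi2, hi3, hi4⟩)
        · exact hs
        · exfalso
          have hk : start ≤ m.length := le_trans hi1 hi2
          have hm1 : PySem.Chars.findFrom m k (start : Int) none = -1 := by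
            rcases pvFindFrom_cases m k start with h1 | h1
            · exact h1
            · exact absurd h1 h
          have hni := (PySem.Chars.findFrom_natCast_eq_neg_one_iff m k start hk).mp hm1
          apply hni
          have heq : List.drop (i - start) (List.drop start m) = List.drop i m := by
            rw [List.drop_drop]; congr 1; omega
          have hpre' : k <+: List.drop (i - start) (List.drop start m) := by rw [heq]; exact hi3
          have hin : PySem.Chars.isIn k (List.drop start m) = true :=
            (PySem.Chars.exists_prefix_drop_iff_isIn k (List.drop start m)).mp ⟨i - start, hpre'⟩
          exact (PySem.Chars.isIn_iff_infix _ _).mp hin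

lemma nodup_pvFindLoop (m k v : List Char) (fuel start : Nat) (dist : PySem.Set (List Char)) :
    dist.Nodup → (pvFindLoop m k v fuel start dist).Nodup := by
  induction fuel generalizing start dist with
  | zero =>
    intro hd
    rw [pvFindLoop]
    exact hd
  | succ fuel ih =>
    intro hd
    rw [pvFindLoop]
    by_cases h : 0 ≤ PySem.Chars.findFrom m k (start : Int) none
    · rw [if_pos h]
      exact ih _ _ (PySem.Set.nodup_add _ _ hd)
    · rw [if_neg h]
      exact hd

lemma mem_foldl_pvFindLoop (reps : List (String × String)) (m : List Char)
    (dist : PySem.Set (List Char)) (s : List Char) :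
    s ∈ reps.foldl (fun dist kv => pvFindLoop m kv.1.toList kv.2.toList (m.length + 2) 0 dist) dist ↔
      s ∈ dist ∨ ∃ kv ∈ reps, ∃ i : Nat, i ≤ m.length ∧ kv.1.toList <+: m.drop i ∧
        s = pvCand m kv.2.toList i kv.1.toList.length := by
  induction reps generalizing dist with
  | nil => simp
  | cons kv rest ih =>
    rw [List.foldl_cons, ih, mem_pvFindLoop m _ _ _ _ _ _ (by omega)]
    constructor
    · rintro ((hs | ⟨i, _, hi2, hi3, hi4⟩) | ⟨kv', hkv', hrest⟩)
      · exact Or.inl hs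
      · exact Or.inr ⟨kv, List.mem_cons_self, i, hi2, hi3, hi4⟩
      · exact Or.inr ⟨kv', List.mem_cons_of_mem _ hkv', hrest⟩
    · rintro (hs | ⟨kv', hkv', hrest⟩)
      · exact Or.inl (Or.inl hs)
      · rcases List.mem_cons.mp hkv' with rfl | hmem
        · obtain ⟨i, hi2, hi3, hi4⟩ := hrest
          exact Or.inl (Or.inr ⟨i, Nat.zero_le _, hi2, hi3, hi4⟩)
        · exact Or.inr ⟨kv', hmem, hrest⟩

lemma nodup_foldl_pvFindLoop (reps : List (String × String)) (m : List Char)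
    (dist : PySem.Set (List Char)) (hd : dist.Nodup) :
    (reps.foldl (fun dist kv => pvFindLoop m kv.1.toList kv.2.toList (m.length + 2) 0 dist) dist).Nodup := by
  induction reps generalizing dist with
  | nil => exact hd
  | cons kv rest ih =>
    rw [List.foldl_cons]
    exact ih _ (nodup_pvFindLoop _ _ _ _ _ _ hd)

-- the slice comparison molecule[i:i+len(k)] == k is the prefix test on the i-suffix
lemma pvSliceCondBridge (m k : List Char) (i : Int) (h0 : 0 ≤ i) :
    (PySem.List.slice m (some i) (some (i + (k.length : Int))) == k) = true ↔
      k <+: List.drop i.toNat m := by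
  rw [beq_iff_eq, PySem.List.slice_toNat m h0 (by omega)]
  have h1 : (i + (k.length : Int)).toNat - i.toNat = k.length := by omega
  rw [h1, eq_comm]
  exact (List.prefix_iff_eq_take).symm

-- B-side: membership of the candidate list at one cut position
lemma mem_pvCandsAt (reps : List (String × String)) (m : List Char) (i : Int) (h0 : 0 ≤ i)
    (s : List Char) :
    s ∈ pvCandsAt reps m i ↔
      ∃ kv ∈ reps, kv.1.toList <+: m.drop i.toNat ∧ s = pvCand m kv.2.toList i.toNat kv.1.toList.length := by
  simp only [pvCandsAt, List.mem_map, List.mem_filter]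
  constructor
  · rintro ⟨kv, ⟨hkv, hc⟩, rfl⟩
    exact ⟨kv, hkv, (pvSliceCondBridge m kv.1.toList i h0).mp hc,
      pvOutBridge m kv.2.toList kv.1.toList i h0⟩
  · rintro ⟨kv, hkv, hpre, rfl⟩
    exact ⟨kv, ⟨hkv, (pvSliceCondBridge m kv.1.toList i h0).mpr hpre⟩,
      pvOutBridge m kv.2.toList kv.1.toList i h0⟩

-- B-side: the scan 'count += 1 when c != prev' over a sorted list counts the distinct elements
lemma pvScan_sorted (l : List (List Char)) (hs : l.Pairwise (fun a b : List Char => a ≤ b))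
    (cnt : Int) (p : Option (List Char))
    (hp : ∀ x ∈ l, ∀ q ∈ p, q ≤ x) :
    (l.foldl (fun s c => (if some c == s.2 then s.1 else s.1 + 1, some c)) (cnt, p)).1
      = cnt + ((l.toFinset \ p.elim ∅ (fun q => {q})).card : Int) := by
  induction l generalizing cnt p with
  | nil => simp
  | cons a t ih =>
    obtain ⟨ha, ht⟩ := List.pairwise_cons.mp hs
    rw [List.foldl_cons]
    simp only [beq_iff_eq] at ih ⊢
    split_ifs with hpa
    · rw [ih ht cnt (some a) (fun x hx q hq => by cases hq; exact ha x hx)]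
      rw [← hpa]
      congr 2
      simp only [List.toFinset_cons, Option.elim]
      rw [Finset.insert_sdiff_of_mem _ (Finset.mem_singleton_self a)]
    · rw [ih ht (cnt + 1) (some a) (fun x hx q hq => by cases hq; exact ha x hx)]
      have hpa' : p ≠ some a := fun h => hpa h.symm
      have hnot : ∀ q ∈ p, q ∉ (a :: t).toFinset := by
        intro q hq hmem
        have hqa : q ≠ a := fun h => hpa' (by cases hq; rw [h])
        rcases List.mem_toFinset.mp hmem with hm
        rcases List.mem_cons.mp hm with rfl | hmt
        · exact hqa rfl
        · have h1 : q ≤ a := hp a List.mem_cons_self q hq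
          have h2 : a ≤ q := ha q hmt
          exact hqa (le_antisymm h1 h2)
      have hPd : (a :: t).toFinset \ p.elim ∅ (fun q => {q}) = (a :: t).toFinset := by
        cases p with
        | none => simp
        | some q =>
          simp only [Option.elim]
          rw [Finset.sdiff_singleton_eq_erase, Finset.erase_eq_of_notMem (hnot q rfl)]
      rw [hPd]
      have hcard : ((a :: t).toFinset).card = (t.toFinset \ ({a} : Finset (List Char))).card + 1 := by
        rw [List.toFinset_cons, Finset.sdiff_singleton_eq_erase]
        by_cases hat : a ∈ t.toFinset
        · rw [Finset.card_insert_of_mem hat, Finset.card_erase_add_one hat]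
        · rw [Finset.card_insert_of_notMem hat, Finset.erase_eq_of_notMem hat]
      simp only [Option.elim] at *
      rw [hcard]
      push_cast
      ring

-- membership of B's full candidate list = the same characterization as A's set
lemma mem_pvCandidates (reps : List (String × String)) (m : List Char) (s : List Char) :
    s ∈ (PySem.List.pyRange 0 ((m.length : Int) + 1) 1).flatMap (pvCandsAt reps m) ↔
      ∃ kv ∈ reps, ∃ i : Nat, i ≤ m.length ∧ kv.1.toList <+: m.drop i ∧
        s = pvCand m kv.2.toList i kv.1.toList.length := by
  simp only [List.mem_flatMap, PySem.List.mem_pyRange_one]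
  constructor
  · rintro ⟨i, ⟨hi0, hilt⟩, hmem⟩
    obtain ⟨kv, hkv, hpre, rfl⟩ := (mem_pvCandsAt reps m i hi0 s).mp hmem
    exact ⟨kv, hkv, i.toNat, by omega, hpre, rfl⟩
  · rintro ⟨kv, hkv, i, hile, hpre, rfl⟩
    refine ⟨(i : Int), ⟨Int.natCast_nonneg i, by omega⟩, ?_⟩
    rw [mem_pvCandsAt reps m (i : Int) (Int.natCast_nonneg i)]
    exact ⟨kv, hkv, by rw [Int.toNat_natCast]; exact hpre, by rw [Int.toNat_natCast]⟩

-- ===== VERDICT (by name: the statement is the Claim_ definition above) =====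
theorem count_molecules_spec : Claim_equal_count_molecules := by
  intro reps mol _
  unfold Spec_count_molecules count_molecules count_molecules_alt
  simp only []
  set m := mol.toList with hm
  set cands := (PySem.List.pyRange 0 ((m.length : Int) + 1) 1).flatMap (pvCandsAt reps m) with hcands
  set sortedC := @PySem.List.sorted (List Char) (List Char) List.instLinearOrder.toLT
      LinearOrder.toDecidableLT cands (fun x => x) false with hsorted
  have hpw : sortedC.Pairwise (fun a b : List Char => a ≤ b) := by
    rw [hsorted]; exact PySem.List.sorted_pairwise cands (fun x => x)
  rw [pvScan_sorted sortedC hpw 0 none (fun x _ q hq => by cases hq)]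
  simp only [Option.elim, Finset.sdiff_empty, zero_add]
  have hA := nodup_foldl_pvFindLoop reps m PySem.Set.empty List.nodup_nil
  rw [← List.toFinset_card_of_nodup hA]
  congr 2
  apply Finset.ext
  intro s
  rw [List.mem_toFinset, List.mem_toFinset,
    @PySem.List.mem_sorted (List Char) (List Char) List.instLinearOrder.toLT
      LinearOrder.toDecidableLT cands (fun x => x) false s,
    mem_foldl_pvFindLoop, mem_pvCandidates]
  simp [PySem.Set.empty]
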